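-- pv_equiv track=rewrite | github.com/PaulKuin/uvotpy | uvotpy/uvotspec.py | complement_of_ranges
-- ===== SOURCE A (Python) =====
-- def complement_of_ranges(ranges,rangestart=0,rangeend=None):
--     """given a list of exclusion ranges, compute the complement
--
--     Parameters
--     ==========
--     range : list
--        the range list consists of elements that each specify a
--        bad range in the spectrum. The complement needs also
--        the start and end of the whole range in order to add
--        the leading and trailing complement ranges.
--     rangestart, rangeend : int
--        start and end index of the wavelenght array. Usually
--        that is 0, len(wave)
--
--     """
--     if rangeend == None:
--        raise IOError("complement_of_ranges requires a value for the last index of the range+1")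
--     out = []
--     xr0 = 0
--     for r in ranges:
--        xr1 = r[0]
--        if xr1-xr0 > 1:
--           out.append([xr0,xr1])
--        xr0 = r[1]+1
--     out.append([xr0,rangeend])
--     return out
-- ===== SOURCE B (Python) =====
-- def complement_of_ranges(ranges, rangestart=0, rangeend=None):
--     if rangeend == None:
--         raise IOError("complement_of_ranges requires a value for the last index of the range+1")
--     lefts = [0] + [r[1] + 1 for r in ranges]
--     rights = [r[0] for r in ranges] + [rangeend]
--     pairs = list(zip(lefts, rights))
--     out = [[l, r] for (l, r) in pairs[:-1] if r - l > 1]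
--     out.append([pairs[-1][0], pairs[-1][1]])
--     return out
-- ===== Notes on version B (the rewrite author's own statement) =====
-- stated objective: alternative
-- what changed: Replaces A's single stateful loop (carrying xr0 across iterations) by precomputing the two boundary lists (left ends = 0 plus each r[1]+1, right ends = each r[0] plus rangeend), zipping them into candidate intervals, filtering all but the last by width > 1, and appending the last unconditionally.
import Mathlib
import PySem

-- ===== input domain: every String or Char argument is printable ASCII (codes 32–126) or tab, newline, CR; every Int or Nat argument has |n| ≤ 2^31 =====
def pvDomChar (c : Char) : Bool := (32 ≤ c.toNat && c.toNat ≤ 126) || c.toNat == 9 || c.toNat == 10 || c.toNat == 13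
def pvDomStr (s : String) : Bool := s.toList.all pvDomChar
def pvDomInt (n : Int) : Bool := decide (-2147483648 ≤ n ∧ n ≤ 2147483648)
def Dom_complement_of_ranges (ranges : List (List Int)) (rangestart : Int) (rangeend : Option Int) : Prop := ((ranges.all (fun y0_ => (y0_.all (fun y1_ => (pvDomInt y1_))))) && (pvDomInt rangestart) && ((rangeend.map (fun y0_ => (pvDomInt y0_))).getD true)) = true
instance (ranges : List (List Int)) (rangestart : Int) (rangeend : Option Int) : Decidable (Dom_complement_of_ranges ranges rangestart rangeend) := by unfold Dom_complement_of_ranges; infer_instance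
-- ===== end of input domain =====

-- B replaces A's stateful loop by zipping precomputed boundary lists (alternative decomposition; return-value equivalence proved on Pre_).


-- ===== PORT A =====
-- literal port of A's loop: state (out, xr0); r[0]/r[1] via pyGet? (Pre_ excludes the IndexError/IOError cases)
def complement_of_ranges (ranges : List (List Int)) (rangestart : Int) (rangeend : Option Int) : List (List Int) :=
  match rangeend with
  | none => []  -- Python raises IOError here; excluded by Pre_
  | some re =>
    let st := ranges.foldl (fun (st : List (List Int) × Int) r =>
      let xr1 := (PySem.List.pyGet? r 0).getD 0
      let out := if xr1 - st.2 > 1 then st.1 ++ [[st.2, xr1]] else st.1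
      (out, (PySem.List.pyGet? r 1).getD 0 + 1)) ([], 0)
    st.1 ++ [[st.2, re]]

-- ===== PORT B =====
-- literal port of Source B: boundary lists, zip, filter all but last, append last unconditionally
def complement_of_ranges_alt (ranges : List (List Int)) (rangestart : Int) (rangeend : Option Int) : List (List Int) :=
  match rangeend with
  | none => []  -- Python raises IOError here; excluded by Pre_
  | some re =>
    let lefts : List Int := 0 :: ranges.map (fun r => (PySem.List.pyGet? r 1).getD 0 + 1)
    let rights : List Int := ranges.map (fun r => (PySem.List.pyGet? r 0).getD 0) ++ [re]
    let pairs := lefts.zip rights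
    ((pairs.dropLast.filter (fun p => p.2 - p.1 > 1)).map (fun p => [p.1, p.2]))
      ++ [[(pairs.getLast!).1, (pairs.getLast!).2]]

-- ===== PRECONDITION & SPEC =====
-- Pre_ excludes exactly the inputs where Python A raises: rangeend=None (IOError) and any range element with fewer than 2 entries (IndexError).
def Pre_complement_of_ranges (ranges : List (List Int)) (rangestart : Int) (rangeend : Option Int) : Prop :=
  rangeend.isSome = true ∧ ∀ r ∈ ranges, 2 ≤ r.length
instance (ranges : List (List Int)) (rangestart : Int) (rangeend : Option Int) : Decidable (Pre_complement_of_ranges ranges rangestart rangeend) := by unfold Pre_complement_of_ranges; infer_instance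
def pvWitness_complement_of_ranges : List (List Int) × Int × Option Int := ([[2, 4], [7, 8]], 0, some 12)
def Spec_complement_of_ranges (ranges : List (List Int)) (rangestart : Int) (rangeend : Option Int) (out : List (List Int)) : Prop := out = complement_of_ranges_alt ranges rangestart rangeend
instance (ranges : List (List Int)) (rangestart : Int) (rangeend : Option Int) (out : List (List Int)) : Decidable (Spec_complement_of_ranges ranges rangestart rangeend out) := by unfold Spec_complement_of_ranges; infer_instance

-- ===== CLAIM (what is proved, stated in full; the proofs are below) =====
def Claim_equal_complement_of_ranges : Prop := ∀ (ranges : List (List Int)) (rangestart : Int) (rangeend : Option Int), Dom_complement_of_ranges ranges rangestart rangeend → Pre_complement_of_ranges ranges rangestart rangeend → Spec_complement_of_ranges ranges rangestart rangeend (complement_of_ranges ranges rangestart rangeend)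

-- ===== LEMMAS AND PROOFS =====

lemma pvGetLast!_cons_of_ne_nil {α : Type} [Inhabited α] (a : α) (l : List α) (h : l ≠ []) :
    (a :: l).getLast! = l.getLast! := by
  cases l with
  | nil => contradiction
  | cons b t => simp [List.getLast!]

-- common recursive reference form of both computations
def pvGo (f g : List Int → Int) (re : Int) : Int → List (List Int) → List (List Int)
  | x, [] => [[x, re]]
  | x, r :: rs => (if g r - x > 1 then [[x, g r]] else []) ++ pvGo f g re (f r + 1) rs

def pvStepA (f g : List Int → Int) (st : List (List Int) × Int) (r : List Int) : List (List Int) × Int :=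
  (if g r - st.2 > 1 then st.1 ++ [[st.2, g r]] else st.1, f r + 1)

lemma portA_eq_go (f g : List Int → Int) (re : Int) (rs : List (List Int)) :
    ∀ (x : Int) (acc : List (List Int)),
    (rs.foldl (pvStepA f g) (acc, x)).1 ++ [[(rs.foldl (pvStepA f g) (acc, x)).2, re]]
      = acc ++ pvGo f g re x rs := by
  induction rs with
  | nil => intro x acc; simp [pvGo]
  | cons r rs ih =>
    intro x acc
    simp only [List.foldl_cons, pvGo, pvStepA]
    rw [ih]
    by_cases h : g r - x > 1 <;> simp [h]

def pvPairsB (f g : List Int → Int) (re x : Int) (rs : List (List Int)) : List (Int × Int) :=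
  (x :: rs.map (fun r => f r + 1)).zip (rs.map g ++ [re])

lemma portB_eq_go (f g : List Int → Int) (re : Int) (rs : List (List Int)) :
    ∀ (x : Int),
    (((pvPairsB f g re x rs).dropLast.filter (fun p => p.2 - p.1 > 1)).map (fun p => [p.1, p.2]))
      ++ [[((pvPairsB f g re x rs).getLast!).1, ((pvPairsB f g re x rs).getLast!).2]]
      = pvGo f g re x rs := by
  induction rs with
  | nil => intro x; simp [pvGo, pvPairsB, List.getLast!]
  | cons r rs ih =>
    intro x
    simp only [pvPairsB, List.map_cons, List.cons_append, List.zip_cons_cons, pvGo]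
    have hne : (((f r + 1) :: rs.map (fun r => f r + 1)).zip (rs.map g ++ [re])) ≠ [] := by
      cases rs <;> simp [List.zip_cons_cons]
    rw [List.dropLast_cons_of_ne_nil hne, pvGetLast!_cons_of_ne_nil _ _ hne]
    rw [← ih (f r + 1)]
    by_cases h : g r - x > 1 <;> simp [pvPairsB, h]

-- ===== VERDICT (by name: the statement is the Claim_ definition above) =====
theorem complement_of_ranges_spec : Claim_equal_complement_of_ranges := by
  intro ranges rangestart rangeend _ hpre
  obtain ⟨hsome, _⟩ := hpre
  cases rangeend with
  | none => simp at hsome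
  | some re =>
    show complement_of_ranges ranges rangestart (some re) = complement_of_ranges_alt ranges rangestart (some re)
    unfold complement_of_ranges complement_of_ranges_alt
    simp only
    have hA := portA_eq_go (fun r => (PySem.List.pyGet? r 1).getD 0) (fun r => (PySem.List.pyGet? r 0).getD 0) re ranges 0 []
    have hB := portB_eq_go (fun r => (PySem.List.pyGet? r 1).getD 0) (fun r => (PySem.List.pyGet? r 0).getD 0) re ranges 0
    simp only [pvPairsB] at hB
    rw [← hB] at hA
    simpa using hA
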